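-- pv_equiv track=rewrite | github.com/swh4g6/Codecademy-Portfolio-Projects | Hurricane Analysis Project.py | count_num_area_affected
-- ===== SOURCE A (Python) =====
-- def count_num_area_affected(hurricanes):
--     # empty dictionary to store result
--     area_affected_count = {}
--     # iterate through each hurricane
--     for name in hurricanes:
--         # store list of areas affected for this hurricane
--         this_hurricanes_areas = hurricanes[name]['Areas Affected']
--         # iterate through the areas list
--         for i in range(len(this_hurricanes_areas)):
--             # if area is not in the new dictionary, add it with count 1
--             if this_hurricanes_areas[i] not in area_affected_count:
--                 area_affected_count[this_hurricanes_areas[i]] = 1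
--             # if it already exists, add 1 to the existing count
--             else:
--                 area_affected_count[this_hurricanes_areas[i]] += 1
--     return area_affected_count
-- ===== SOURCE B (Python) =====
-- def count_num_area_affected(hurricanes):
--     # flatten all affected areas across hurricanes, then count each distinct
--     # area (first-occurrence order) with list.count on the flat list
--     flat = [a for h in hurricanes.values() for a in h['Areas Affected']]
--     return {area: flat.count(area) for area in dict.fromkeys(flat)}
-- ===== Notes on version B (the rewrite author's own statement) =====
-- stated objective: alternative
-- what changed: Replaces the incremental dict-counting loop (membership test, insert-or-increment per element) by flatten-all-areas once, dedup in first-occurrence order, then count each distinct area with list.count on the flat list.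
import Mathlib
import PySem

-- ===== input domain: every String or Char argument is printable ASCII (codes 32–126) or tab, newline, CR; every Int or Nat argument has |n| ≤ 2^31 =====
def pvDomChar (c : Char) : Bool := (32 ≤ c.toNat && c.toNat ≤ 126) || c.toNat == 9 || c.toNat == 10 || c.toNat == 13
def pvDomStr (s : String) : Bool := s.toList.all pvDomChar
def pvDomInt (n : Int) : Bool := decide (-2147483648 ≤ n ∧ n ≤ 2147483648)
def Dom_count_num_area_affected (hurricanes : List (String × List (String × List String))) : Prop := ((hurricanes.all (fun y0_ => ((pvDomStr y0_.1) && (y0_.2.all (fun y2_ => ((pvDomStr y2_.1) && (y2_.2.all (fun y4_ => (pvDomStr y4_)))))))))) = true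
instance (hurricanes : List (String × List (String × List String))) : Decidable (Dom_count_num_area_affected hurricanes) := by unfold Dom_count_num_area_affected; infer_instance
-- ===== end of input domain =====

-- B replaces A's incremental insert-or-increment dict loop by flatten + ordered dedup + list.count;
-- the return values agree exactly, different algorithm of similar cost (objective: alternative).

-- ===== PORT A =====
-- A builds a dict by a nested loop: for each hurricane name, index over its
-- 'Areas Affected' list with range(len(..)), inserting count 1 or incrementing.
def count_num_area_affected (hurricanes : List (String × List (String × List String))) : List (String × Int) :=
  let d := PySem.Dict.ofList hurricanes
  let res := d.items.foldl (fun acc nh =>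
    let areas := (PySem.Dict.ofList nh.2).getD "Areas Affected" []   -- total form of ['Areas Affected']; Pre_ guarantees the key is present
    (PySem.List.pyRange 0 areas.length 1).foldl (fun a2 i =>
      let x := PySem.List.pyGetD areas i ""                          -- in-range index from range(len(areas))
      if a2.contains x then a2.insert x (a2.getD x 0 + 1) else a2.insert x 1) acc) PySem.Dict.empty
  res.items

-- ===== PORT B =====
-- B flattens every 'Areas Affected' list, then maps each first-occurrence-distinct
-- area to its count in the flat list.
def count_num_area_affected_alt (hurricanes : List (String × List (String × List String))) : List (String × Int) :=
  let flat := (PySem.Dict.ofList hurricanes).values.flatMap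
    (fun h => (PySem.Dict.ofList h).getD "Areas Affected" [])
  (PySem.List.dedup flat).map (fun area => (area, (flat.count area : Int)))

-- ===== PRECONDITION & SPEC =====
-- Pre_ excludes exactly the inputs where some hurricane's record lacks the key
-- "Areas Affected": there the Python A (and B) raises KeyError.
def Pre_count_num_area_affected (hurricanes : List (String × List (String × List String))) : Prop :=
  ∀ p ∈ hurricanes, "Areas Affected" ∈ p.2.map Prod.fst
instance (hurricanes : List (String × List (String × List String))) : Decidable (Pre_count_num_area_affected hurricanes) := by unfold Pre_count_num_area_affected; infer_instance
def pvWitness_count_num_area_affected : (List (String × List (String × List String))) :=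
  [("Cuba", [("Areas Affected", ["Florida", "Cuba", "Florida"])]), ("Ian", [("Areas Affected", ["Cuba"])])]
def Spec_count_num_area_affected (hurricanes : List (String × List (String × List String))) (out : List (String × Int)) : Prop := out = count_num_area_affected_alt hurricanes
instance (hurricanes : List (String × List (String × List String))) (out : List (String × Int)) : Decidable (Spec_count_num_area_affected hurricanes out) := by unfold Spec_count_num_area_affected; infer_instance

-- ===== CLAIM (what is proved, stated in full; the proofs are below) =====
def Claim_equal_count_num_area_affected : Prop := ∀ (hurricanes : List (String × List (String × List String))), Dom_count_num_area_affected hurricanes → Pre_count_num_area_affected hurricanes → Spec_count_num_area_affected hurricanes (count_num_area_affected hurricanes)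

-- ===== LEMMAS AND PROOFS =====

-- A's insert-or-increment step is the counter step: when the key is absent its
-- count defaults to 0, so 'insert x 1' is 'insert x (getD x 0 + 1)'.
theorem step_eq_counter_step (a2 : PySem.Dict String Int) (x : String) :
    (if a2.contains x then a2.insert x (a2.getD x 0 + 1) else a2.insert x 1)
      = a2.insert x (a2.getD x 0 + 1) := by
  by_cases h : a2.contains x = true
  · simp [h]
  · have h' : a2.contains x = false := by simpa using h
    simp [h', PySem.Dict.getD_of_not_contains]

-- A's inner index loop over range(len(areas)) is a fold over the areas list itself.
theorem inner_loop_eq_foldl (areas : List String) (acc : PySem.Dict String Int) :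
    (PySem.List.pyRange 0 areas.length 1).foldl (fun a2 i =>
        let x := PySem.List.pyGetD areas i ""
        if a2.contains x then a2.insert x (a2.getD x 0 + 1) else a2.insert x 1) acc
      = areas.foldl (fun a2 x => a2.insert x (a2.getD x 0 + 1)) acc := by
  conv_rhs => rw [← PySem.List.map_pyGetD_pyRange_zero areas ""]
  rw [List.foldl_map]
  simp only [step_eq_counter_step]
  rfl

theorem count_num_area_affected_spec : Claim_equal_count_num_area_affected := by
  intro hurricanes _ _
  unfold Spec_count_num_area_affected count_num_area_affected count_num_area_affected_alt
  simp only [inner_loop_eq_foldl]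
  rw [← List.foldl_flatMap, PySem.Dict.foldl_insert_getD_add_one_eq_counter,
      PySem.Dict.items_counter]
  simp [PySem.Dict.values, List.flatMap_map]
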